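-- pv_equiv track=rewrite | github.com/acredsfan/lawnberry_pi | scripts/hooks/consistency_guard.py | _build_validation_steps
-- ===== SOURCE A (Python) =====
-- from typing import Iterable
--
-- BACKEND_HINTS = (
--     "backend/",
--     "tests/",
--     "pyproject.toml",
-- )
--
-- FRONTEND_HINTS = (
--     "frontend/src/",
--     "frontend/package.json",
--     "frontend/vite.config.ts",
--     "frontend/vitest.config.ts",
--     "frontend/playwright.config.ts",
--     "frontend/tsconfig.json",
--     "frontend/tsconfig.app.json",
-- )
--
-- SCRIPT_HINTS = (
--     "scripts/",
--     ".specify/scripts/",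
-- )
--
-- def _matches_any(path: str, prefixes: Iterable[str]) -> bool:
--     return any(path == prefix or path.startswith(prefix) for prefix in prefixes)
--
-- def _build_validation_steps(changed_paths: list[str]) -> list[str]:
--     steps: list[str] = []
--
--     if any(_matches_any(path, BACKEND_HINTS) for path in changed_paths):
--         steps.append("Backend changes detected: run `pytest -q`.")
--
--     if any(_matches_any(path, FRONTEND_HINTS) for path in changed_paths):
--         steps.append(
--             "Frontend changes detected: run `cd frontend && npm run type-check && npm run test && npm run build`."
--         )
--
--     if any(_matches_any(path, SCRIPT_HINTS) for path in changed_paths):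
--         steps.append("Script or tooling changes detected: run `bash scripts/check_docs_drift.sh`.")
--
--     return steps
-- ===== SOURCE B (Python) =====
-- BACKEND_HINTS = (
--     "backend/",
--     "tests/",
--     "pyproject.toml",
-- )
--
-- FRONTEND_HINTS = (
--     "frontend/src/",
--     "frontend/package.json",
--     "frontend/vite.config.ts",
--     "frontend/vitest.config.ts",
--     "frontend/playwright.config.ts",
--     "frontend/tsconfig.json",
--     "frontend/tsconfig.app.json",
-- )
--
-- SCRIPT_HINTS = (
--     "scripts/",
--     ".specify/scripts/",
-- )
--
--
-- def _build_validation_steps(changed_paths: list[str]) -> list[str]: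
--     # Single pass: maintain one flag per group instead of three separate scans.
--     backend = frontend = script = False
--     for path in changed_paths:
--         if not backend and any(path.startswith(p) for p in BACKEND_HINTS):
--             backend = True
--         if not frontend and any(path.startswith(p) for p in FRONTEND_HINTS):
--             frontend = True
--         if not script and any(path.startswith(p) for p in SCRIPT_HINTS):
--             script = True
--
--     steps: list[str] = []
--     if backend:
--         steps.append("Backend changes detected: run `pytest -q`.")
--     if frontend:
--         steps.append(
--             "Frontend changes detected: run `cd frontend && npm run type-check && npm run test && npm run build`."
--         )
--     if script:
--         steps.append("Script or tooling changes detected: run `bash scripts/check_docs_drift.sh`.")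
--     return steps
-- ===== Notes on version B (the rewrite author's own statement) =====
-- stated objective: alternative
-- what changed: Replaces three separate any(...) scans over changed_paths with one pass maintaining three booleans (each group checked only until its flag is set), then emits the messages in the fixed order.
import Mathlib
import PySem

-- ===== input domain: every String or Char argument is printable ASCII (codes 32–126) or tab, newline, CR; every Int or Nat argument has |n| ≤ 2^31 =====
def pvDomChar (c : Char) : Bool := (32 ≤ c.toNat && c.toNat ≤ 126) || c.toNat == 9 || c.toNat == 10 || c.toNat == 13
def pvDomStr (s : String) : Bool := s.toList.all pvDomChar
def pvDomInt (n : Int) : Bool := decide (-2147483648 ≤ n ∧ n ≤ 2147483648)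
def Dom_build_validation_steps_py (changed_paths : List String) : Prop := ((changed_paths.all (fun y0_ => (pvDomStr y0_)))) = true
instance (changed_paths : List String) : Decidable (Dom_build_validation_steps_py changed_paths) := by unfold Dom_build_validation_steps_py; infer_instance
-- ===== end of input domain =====

-- B replaces A's three separate any(...) scans by one pass keeping three booleans (objective: alternative decomposition).

-- ===== PORT A =====
def pvBackendHints : List String := ["backend/", "tests/", "pyproject.toml"]
def pvFrontendHints : List String :=
  ["frontend/src/", "frontend/package.json", "frontend/vite.config.ts",
   "frontend/vitest.config.ts", "frontend/playwright.config.ts",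
   "frontend/tsconfig.json", "frontend/tsconfig.app.json"]
def pvScriptHints : List String := ["scripts/", ".specify/scripts/"]

def matches_any (path : String) (prefixes : List String) : Bool :=
  prefixes.any (fun pre => path == pre || PySem.Str.startswith path pre)

def build_validation_steps_py (changed_paths : List String) : List String :=
  let steps : List String := []
  let steps := if changed_paths.any (fun path => matches_any path pvBackendHints) then
      steps ++ ["Backend changes detected: run `pytest -q`."] else steps
  let steps := if changed_paths.any (fun path => matches_any path pvFrontendHints) then
      steps ++ ["Frontend changes detected: run `cd frontend && npm run type-check && npm run test && npm run build`."] else steps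
  let steps := if changed_paths.any (fun path => matches_any path pvScriptHints) then
      steps ++ ["Script or tooling changes detected: run `bash scripts/check_docs_drift.sh`."] else steps
  steps

-- ===== PORT B =====
def altHit (path : String) (prefixes : List String) : Bool :=
  prefixes.any (fun pre => PySem.Str.startswith path pre)

def build_validation_steps_py_alt (changed_paths : List String) : List String :=
  let flags := changed_paths.foldl
    (fun (st : Bool × Bool × Bool) path =>
      let b := if !st.1 && altHit path pvBackendHints then true else st.1
      let f := if !st.2.1 && altHit path pvFrontendHints then true else st.2.1
      let s := if !st.2.2 && altHit path pvScriptHints then true else st.2.2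
      (b, f, s))
    (false, false, false)
  (if flags.1 then ["Backend changes detected: run `pytest -q`."] else []) ++
  (if flags.2.1 then ["Frontend changes detected: run `cd frontend && npm run type-check && npm run test && npm run build`."] else []) ++
  (if flags.2.2 then ["Script or tooling changes detected: run `bash scripts/check_docs_drift.sh`."] else [])

-- ===== PRECONDITION & SPEC =====
def Spec_build_validation_steps_py (changed_paths : List String) (out : List String) : Prop := out = build_validation_steps_py_alt changed_paths
instance (changed_paths : List String) (out : List String) : Decidable (Spec_build_validation_steps_py changed_paths out) := by unfold Spec_build_validation_steps_py; infer_instance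

-- ===== CLAIM (what is proved, stated in full; the proofs are below) =====
def Claim_equal_build_validation_steps_py : Prop := ∀ (changed_paths : List String), Dom_build_validation_steps_py changed_paths → Spec_build_validation_steps_py changed_paths (build_validation_steps_py changed_paths)

-- ===== LEMMAS AND PROOFS =====

-- equality is redundant next to startswith, so A's per-path test equals B's
theorem matches_any_eq_altHit (path : String) (prefixes : List String) :
    matches_any path prefixes = altHit path prefixes := by
  unfold matches_any altHit
  induction prefixes with
  | nil => rfl
  | cons p ps ih =>
    simp only [List.any_cons] at *
    rw [ih]
    by_cases h : path = p
    · subst h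
      have h1 : PySem.Chars.startswith path.toList path.toList = true :=
        by rw [PySem.Chars.startswith_iff]
      simp [h1]
    · simp [beq_eq_false_iff_ne.mpr h]

-- the fold computes the three 'any' results
theorem fold_flags (xs : List String) (b f s : Bool) :
    xs.foldl
      (fun (st : Bool × Bool × Bool) path =>
        let b := if !st.1 && altHit path pvBackendHints then true else st.1
        let f := if !st.2.1 && altHit path pvFrontendHints then true else st.2.1
        let s := if !st.2.2 && altHit path pvScriptHints then true else st.2.2
        (b, f, s))
      (b, f, s)
    = (b || xs.any (fun p => altHit p pvBackendHints),
       f || xs.any (fun p => altHit p pvFrontendHints),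
       s || xs.any (fun p => altHit p pvScriptHints)) := by
  induction xs generalizing b f s with
  | nil => simp
  | cons x xs ih =>
    simp only [List.foldl_cons, List.any_cons, ih]
    cases b <;> cases f <;> cases s <;> cases hb : altHit x pvBackendHints <;>
      cases hf : altHit x pvFrontendHints <;> cases hs : altHit x pvScriptHints <;> simp_all

-- ===== VERDICT (by name: the statement is the Claim_ definition above) =====
theorem build_validation_steps_py_spec : Claim_equal_build_validation_steps_py := by
  intro xs _
  unfold Spec_build_validation_steps_py build_validation_steps_py build_validation_steps_py_alt
  rw [fold_flags]
  simp only [Bool.false_or]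
  simp only [matches_any_eq_altHit]
  split_ifs <;> simp
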